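-- pv_equiv track=rewrite | github.com/kprdes/tarea1 | tarea1.py | sumarValoresMatriz
-- ===== SOURCE A (Python) =====
-- def sumarValoresMatriz(matriz, parejas):
--     suma = 0
--     for i in range(len(parejas)):
--             if matriz.get(parejas[i][0]) != None:
--                 for j in range(len(matriz[parejas[i][0]])):
--                     if matriz[parejas[i][0]][j][0] == parejas[i][1]:
--                         valor  = matriz[parejas[i][0]][j][1]
--                         suma += valor
--     return suma
-- ===== SOURCE B (Python) =====
-- def sumarValoresMatriz(matriz, parejas):
--     cuenta = {}
--     for pareja in parejas:
--         clave = (pareja[0], pareja[1])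
--         cuenta[clave] = cuenta.get(clave, 0) + 1
--     suma = 0
--     for clave, fila in matriz.items():
--         for entrada in fila:
--             suma += entrada[1] * cuenta.get((clave, entrada[0]), 0)
--     return suma
-- ===== Notes on version B (the rewrite author's own statement) =====
-- stated objective: alternative
-- what changed: B inverts the loop nesting: it builds a multiplicity dict over the queried (key, subkey) pairs once, then makes a single pass over the matrix adding each cell's value times how often it is queried, instead of scanning a whole row per query.
import Mathlib
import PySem

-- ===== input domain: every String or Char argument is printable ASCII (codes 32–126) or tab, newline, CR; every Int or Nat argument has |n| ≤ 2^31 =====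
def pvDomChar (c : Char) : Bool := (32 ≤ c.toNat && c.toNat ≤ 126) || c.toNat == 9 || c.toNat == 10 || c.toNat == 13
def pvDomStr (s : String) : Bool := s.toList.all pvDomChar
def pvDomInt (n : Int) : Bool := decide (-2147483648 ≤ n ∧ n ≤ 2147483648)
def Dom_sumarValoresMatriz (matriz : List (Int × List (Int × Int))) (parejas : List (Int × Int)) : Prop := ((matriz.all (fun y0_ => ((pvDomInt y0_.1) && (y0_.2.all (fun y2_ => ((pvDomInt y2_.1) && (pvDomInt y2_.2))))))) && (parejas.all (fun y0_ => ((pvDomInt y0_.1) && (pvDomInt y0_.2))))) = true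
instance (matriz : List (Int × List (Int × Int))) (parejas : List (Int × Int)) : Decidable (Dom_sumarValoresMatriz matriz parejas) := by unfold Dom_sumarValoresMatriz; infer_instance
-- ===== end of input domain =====

-- B flips the loop nesting: one counting dict over the queried pairs, then a single
-- pass over the matrix weighting each cell by its query multiplicity ('alternative' objective).

-- ===== PORT A =====
-- matriz.get(k): first-match lookup in the association list representing the dict
def pvGetFila (matriz : List (Int × List (Int × Int))) (k : Int) : Option (List (Int × Int)) :=
  match matriz with
  | [] => none
  | (k', v) :: rest => if k' == k then some v else pvGetFila rest k

def sumarValoresMatriz (matriz : List (Int × List (Int × Int))) (parejas : List (Int × Int)) : Int :=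
  parejas.foldl (fun suma par =>
    match pvGetFila matriz par.1 with
    | none => suma
    | some fila => fila.foldl (fun s e => if e.1 == par.2 then s + e.2 else s) suma) 0

-- ===== PORT B =====
def sumarValoresMatriz_alt (matriz : List (Int × List (Int × Int))) (parejas : List (Int × Int)) : Int :=
  let cuenta : PySem.Dict (Int × Int) Int :=
    parejas.foldl (fun d par => d.modify (par.1, par.2) 0 (· + 1)) PySem.Dict.empty
  matriz.foldl (fun suma kv =>
    kv.2.foldl (fun s e => s + e.2 * cuenta.getD (kv.1, e.1) 0) suma) 0

-- ===== PRECONDITION & SPEC =====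
-- Pre_ requires the keys of the association list standing for the Python dict `matriz` to be
-- pairwise distinct: a real Python dict can never have duplicate keys, so this excludes no
-- input the Python A ever receives, only assoc lists that represent no dict.
def Pre_sumarValoresMatriz (matriz : List (Int × List (Int × Int))) (parejas : List (Int × Int)) : Prop :=
  (matriz.map Prod.fst).Nodup

instance (matriz : List (Int × List (Int × Int))) (parejas : List (Int × Int)) : Decidable (Pre_sumarValoresMatriz matriz parejas) := by unfold Pre_sumarValoresMatriz; infer_instance

def pvWitness_sumarValoresMatriz : (List (Int × List (Int × Int))) × (List (Int × Int)) :=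
  ([(1, [(2, 5), (3, 7)]), (4, [(2, 1)])], [(1, 2), (1, 3), (1, 2), (9, 9)])

def Spec_sumarValoresMatriz (matriz : List (Int × List (Int × Int))) (parejas : List (Int × Int)) (out : Int) : Prop := out = sumarValoresMatriz_alt matriz parejas
instance (matriz : List (Int × List (Int × Int))) (parejas : List (Int × Int)) (out : Int) : Decidable (Spec_sumarValoresMatriz matriz parejas out) := by unfold Spec_sumarValoresMatriz; infer_instance

-- ===== CLAIM (what is proved, stated in full; the proofs are below) =====
def Claim_equal_sumarValoresMatriz : Prop := ∀ (matriz : List (Int × List (Int × Int))) (parejas : List (Int × Int)), Dom_sumarValoresMatriz matriz parejas → Pre_sumarValoresMatriz matriz parejas → Spec_sumarValoresMatriz matriz parejas (sumarValoresMatriz matriz parejas)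

-- ===== LEMMAS AND PROOFS =====

-- per-row matched-value sum (what A's inner loop adds for one query against one row)
def wA (c : Int) (fila : List (Int × Int)) : Int :=
  (fila.map (fun e => if e.1 == c then e.2 else 0)).sum

-- A's contribution of one query pair
def fA (matriz : List (Int × List (Int × Int))) (par : Int × Int) : Int :=
  match pvGetFila matriz par.1 with
  | none => 0
  | some fila => wA par.2 fila

-- B's contribution of one matrix row, given the query list
def rB (parejas : List (Int × Int)) (row : Int × List (Int × Int)) : Int :=
  (row.2.map (fun e => e.2 * (parejas.count (row.1, e.1) : Int))).sum

theorem innerA_shift (c : Int) (fila : List (Int × Int)) : ∀ a : Int,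
    fila.foldl (fun s e => if e.1 == c then s + e.2 else s) a
      = a + (fila.map (fun e => if e.1 == c then e.2 else 0)).sum := by
  induction fila with
  | nil => intro a; simp
  | cons e t ih =>
      intro a
      rw [List.foldl_cons, List.map_cons, List.sum_cons]
      by_cases h : (e.1 == c) = true
      · rw [if_pos h, if_pos h, ih]; ring
      · rw [if_neg h, if_neg h, ih]; ring

theorem A_eq_sum (matriz : List (Int × List (Int × Int))) (parejas : List (Int × Int)) :
    sumarValoresMatriz matriz parejas = (parejas.map (fA matriz)).sum := by
  unfold sumarValoresMatriz
  suffices h : ∀ a : Int, parejas.foldl (fun suma par =>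
      match pvGetFila matriz par.1 with
      | none => suma
      | some fila => fila.foldl (fun s e => if e.1 == par.2 then s + e.2 else s) suma) a
      = a + (parejas.map (fA matriz)).sum by
    simpa using h 0
  induction parejas with
  | nil => intro a; simp
  | cons par t ih =>
      intro a
      simp only [List.foldl_cons, List.map_cons, List.sum_cons]
      have hF : (match pvGetFila matriz par.1 with
          | none => a
          | some fila => fila.foldl (fun s e => if e.1 == par.2 then s + e.2 else s) a)
          = a + fA matriz par := by
        unfold fA
        rcases pvGetFila matriz par.1 with _ | fila
        · simp
        · dsimp only
          rw [innerA_shift par.2 fila a]; rfl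
      rw [hF, ih]; ring

theorem innerB_shift (cuenta : PySem.Dict (Int × Int) Int) (k : Int)
    (fila : List (Int × Int)) (a : Int) :
    fila.foldl (fun s e => s + e.2 * cuenta.getD (k, e.1) 0) a
      = a + (fila.map (fun e => e.2 * cuenta.getD (k, e.1) 0)).sum := by
  induction fila generalizing a with
  | nil => simp
  | cons e t ih => simp [ih]; ring

theorem B_eq_sum (matriz : List (Int × List (Int × Int))) (parejas : List (Int × Int)) :
    sumarValoresMatriz_alt matriz parejas = (matriz.map (rB parejas)).sum := by
  unfold sumarValoresMatriz_alt
  have hcount : ∀ v : Int × Int,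
      (parejas.foldl (fun d par => d.modify (par.1, par.2) 0 (· + 1)) PySem.Dict.empty).getD v 0
        = (parejas.count v : Int) := by
    intro v
    have := PySem.Dict.getD_foldl_modify_add_one parejas (d := PySem.Dict.empty) (v := v)
    simpa using this
  suffices h : ∀ a : Int, matriz.foldl (fun suma kv =>
      kv.2.foldl (fun s e => s + e.2 *
        (parejas.foldl (fun d par => d.modify (par.1, par.2) 0 (· + 1)) PySem.Dict.empty).getD (kv.1, e.1) 0) suma) a
      = a + (matriz.map (rB parejas)).sum by
    simpa using h 0
  induction matriz with
  | nil => intro a; simp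
  | cons kv t ih =>
      intro a
      simp only [List.foldl_cons, List.map_cons, List.sum_cons]
      rw [innerB_shift, ih]
      simp only [rB]
      have : (kv.2.map (fun e => e.2 *
          (parejas.foldl (fun d par => d.modify (par.1, par.2) 0 (· + 1)) PySem.Dict.empty).getD (kv.1, e.1) 0)).sum
          = (kv.2.map (fun e => e.2 * (parejas.count (kv.1, e.1) : Int))).sum := by
        congr 1
        exact List.map_congr_left (fun e _ => by rw [hcount])
      rw [this, add_assoc]

-- rows whose key is absent contribute nothing to the per-query column sum
theorem sum_delta_zero (par : Int × Int) (m : List (Int × List (Int × Int)))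
    (h : par.1 ∉ m.map Prod.fst) :
    (m.map (fun row => (row.2.map (fun e => if (row.1, e.1) == par then e.2 else 0)).sum)).sum = 0 := by
  induction m with
  | nil => simp
  | cons row t ih =>
      simp only [List.map_cons, List.mem_cons, not_or] at h
      obtain ⟨h1, h2⟩ := h
      simp only [List.map_cons, List.sum_cons, ih h2, add_zero]
      have hz : ∀ e ∈ row.2, (if (row.1, e.1) == par then e.2 else 0) = 0 := by
        intro e _
        have : ¬((row.1, e.1) == par) = true := by
          simp only [beq_iff_eq]
          intro heq; exact h1 (by rw [← heq])
        rw [if_neg this]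
      rw [List.map_congr_left hz]
      simp

-- under distinct keys, the column sum over the matrix at one query equals A's lookup sum
theorem key_lemma (par : Int × Int) (m : List (Int × List (Int × Int)))
    (hnd : (m.map Prod.fst).Nodup) :
    (m.map (fun row => (row.2.map (fun e => if (row.1, e.1) == par then e.2 else 0)).sum)).sum
      = fA m par := by
  induction m with
  | nil => simp [fA, pvGetFila]
  | cons row t ih =>
      simp only [List.map_cons, List.nodup_cons] at hnd
      obtain ⟨hmem, hnd'⟩ := hnd
      simp only [List.map_cons, List.sum_cons]
      by_cases hk : row.1 = par.1
      · have habs : par.1 ∉ t.map Prod.fst := hk ▸ hmem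
        rw [sum_delta_zero par t habs, add_zero]
        have hget : pvGetFila (row :: t) par.1 = some row.2 := by
          cases row with
          | mk k v => simp [pvGetFila, show k = par.1 from hk]
        simp only [fA, hget]
        unfold wA
        congr 1
        refine List.map_congr_left (fun e _ => ?_)
        obtain ⟨p1, p2⟩ := par
        simp only at hk
        by_cases h : e.1 = p2
        · rw [if_pos (by simp [hk, h]), if_pos (by simp [h])]
        · rw [if_neg (by simp [hk, h]), if_neg (by simp [h])]
      · have hhead : ∀ e ∈ row.2, (if (row.1, e.1) == par then e.2 else 0) = 0 := by
          intro e _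
          have : ¬((row.1, e.1) == par) = true := by
            simp only [beq_iff_eq]
            intro heq; exact hk (by rw [← heq])
          rw [if_neg this]
        rw [List.map_congr_left hhead]
        have hget : pvGetFila (row :: t) par.1 = pvGetFila t par.1 := by
          cases row with
          | mk k v => simp [pvGetFila, hk]
        have hfa : fA (row :: t) par = fA t par := by unfold fA; rw [hget]
        rw [hfa, ← ih hnd']
        simp

-- main double-counting lemma: query-major summation equals matrix-major summation
theorem exchange (m : List (Int × List (Int × Int))) (p : List (Int × Int))
    (hnd : (m.map Prod.fst).Nodup) :
    (p.map (fA m)).sum = (m.map (rB p)).sum := by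
  induction p with
  | nil =>
      simp only [List.map_nil, List.sum_nil]
      symm
      refine List.sum_eq_zero ?_
      intro x hx
      simp only [List.mem_map] at hx
      obtain ⟨row, _, rfl⟩ := hx
      simp [rB]
  | cons par t ih =>
      simp only [List.map_cons, List.sum_cons, ih]
      have hsplit : ∀ row : Int × List (Int × Int), rB (par :: t) row
          = (row.2.map (fun e => if (row.1, e.1) == par then e.2 else 0)).sum + rB t row := by
        intro row
        simp only [rB]
        rw [← List.sum_map_add]
        refine congrArg List.sum (List.map_congr_left (fun e _ => ?_))
        by_cases h : (row.1, e.1) = par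
        · rw [List.count_cons, if_pos (beq_iff_eq.mpr h.symm), if_pos (beq_iff_eq.mpr h)]
          push_cast; ring
        · have hb : ((row.1, e.1) == par) = false := beq_eq_false_iff_ne.mpr h
          rw [List.count_cons, if_neg (by simpa using (fun hh : par = (row.1, e.1) => h hh.symm)),
            if_neg (by simp [hb])]
          push_cast; ring
      calc fA m par + (m.map (rB t)).sum
          = (m.map (fun row => (row.2.map (fun e => if (row.1, e.1) == par then e.2 else 0)).sum)).sum
            + (m.map (rB t)).sum := by rw [key_lemma par m hnd]
        _ = (m.map (rB (par :: t))).sum := by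
            rw [← List.sum_map_add]
            exact congrArg List.sum (List.map_congr_left (fun row _ => (hsplit row).symm))

-- ===== VERDICT (by name: the statement is the Claim_ definition above) =====
theorem sumarValoresMatriz_spec : Claim_equal_sumarValoresMatriz := by
  intro matriz parejas _ hpre
  unfold Spec_sumarValoresMatriz
  rw [A_eq_sum, B_eq_sum, exchange matriz parejas hpre]
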